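-- pv_equiv track=rewrite | github.com/11sid11/unblurbrief-content-os | UnblurBrief-Content-OS/generate_post_candidates.py | choose_post_format
-- ===== SOURCE A (Python) =====
-- def choose_post_format(item):
--     title = item.get("title", "").lower()
--     angle = item.get("content_angle", "").lower()
--     category = item.get("category", "").lower()
--     if "banking" in angle or "economy" in angle or "markets" in angle or "regulation" in angle:
--         return "Exam Lens"
--     if "geopolitics" in angle:
--         return "Explained Simply"
--     if angle == "politics explainer":
--         return "What Happened?"
--     if "science" in angle or "space" in angle or "health" in angle:
--         return "Why It Matters"
--     if any(w in title for w in ["killed","injured","fire","explosion","crash","attack"]):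
--         return "What Happened?"
--     if "india" in category:
--         return "Why It Matters"
--     return "Explained Simply"
-- ===== SOURCE B (Python) =====
-- ANGLE_RULES = [
--     (0, "banking", "Exam Lens"),
--     (0, "economy", "Exam Lens"),
--     (0, "markets", "Exam Lens"),
--     (0, "regulation", "Exam Lens"),
--     (1, "geopolitics", "Explained Simply"),
--     (3, "science", "Why It Matters"),
--     (3, "space", "Why It Matters"),
--     (3, "health", "Why It Matters"),
-- ]
--
-- TITLE_WORDS = ["killed", "injured", "fire", "explosion", "crash", "attack"]
--
--
-- def _hits(angle, title, category):
--     hits = [(p, lbl) for (p, kw, lbl) in ANGLE_RULES if kw in angle]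
--     if angle == "politics explainer":
--         hits.append((2, "What Happened?"))
--     hits += [(4, "What Happened?") for w in TITLE_WORDS if w in title]
--     if "india" in category:
--         hits.append((5, "Why It Matters"))
--     return hits
--
--
-- def choose_post_format(item):
--     angle = item.get("content_angle", "").lower()
--     title = item.get("title", "").lower()
--     category = item.get("category", "").lower()
--     return min(_hits(angle, title, category), default=(6, "Explained Simply"))[1]
-- ===== Notes on version B (the rewrite author's own statement) =====
-- stated objective: alternative
-- what changed: Instead of A's priority-ordered if-chain that returns at the first matching rule, B collects (priority, label) pairs for ALL matching rules in one pass and then selects the minimum-priority hit via min() with a default.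
import Mathlib
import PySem

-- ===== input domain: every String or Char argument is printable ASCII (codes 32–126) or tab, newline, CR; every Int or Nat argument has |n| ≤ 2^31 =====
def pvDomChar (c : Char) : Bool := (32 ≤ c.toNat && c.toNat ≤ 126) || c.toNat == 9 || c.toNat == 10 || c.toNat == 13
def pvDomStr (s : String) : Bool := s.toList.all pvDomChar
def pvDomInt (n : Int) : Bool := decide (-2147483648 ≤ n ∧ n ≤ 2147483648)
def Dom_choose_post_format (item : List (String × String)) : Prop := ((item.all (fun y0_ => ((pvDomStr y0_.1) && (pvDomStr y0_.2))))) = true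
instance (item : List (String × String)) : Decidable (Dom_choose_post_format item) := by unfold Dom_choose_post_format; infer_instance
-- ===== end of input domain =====

-- B replaces A's first-match early-return if-chain by a find-all-then-select algorithm: it
-- collects (priority, label) pairs for EVERY matching rule and returns the label of the
-- minimum-priority hit (objective: alternative, same cost).

-- ===== PORT A =====
def choose_post_format (item : List (String × String)) : String :=
  let title := PySem.Str.lower (PySem.Dict.getD (PySem.Dict.ofList item) "title" "")
  let angle := PySem.Str.lower (PySem.Dict.getD (PySem.Dict.ofList item) "content_angle" "")
  let category := PySem.Str.lower (PySem.Dict.getD (PySem.Dict.ofList item) "category" "")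
  if PySem.Str.isIn "banking" angle || PySem.Str.isIn "economy" angle || PySem.Str.isIn "markets" angle || PySem.Str.isIn "regulation" angle then
    "Exam Lens"
  else if PySem.Str.isIn "geopolitics" angle then
    "Explained Simply"
  else if angle == "politics explainer" then
    "What Happened?"
  else if PySem.Str.isIn "science" angle || PySem.Str.isIn "space" angle || PySem.Str.isIn "health" angle then
    "Why It Matters"
  else if (["killed","injured","fire","explosion","crash","attack"].any (fun w => PySem.Str.isIn w title)) then
    "What Happened?"
  else if PySem.Str.isIn "india" category then
    "Why It Matters"
  else
    "Explained Simply"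

-- ===== PORT B =====
def cpfAngleRules : List (Int × String × String) :=
  [ (0, "banking", "Exam Lens"), (0, "economy", "Exam Lens"),
    (0, "markets", "Exam Lens"), (0, "regulation", "Exam Lens"),
    (1, "geopolitics", "Explained Simply"),
    (3, "science", "Why It Matters"), (3, "space", "Why It Matters"),
    (3, "health", "Why It Matters") ]

def cpfTitleWords : List String := ["killed", "injured", "fire", "explosion", "crash", "attack"]

-- all matching rules as (priority, label) pairs, in rule-table order
def cpfHits (angle title category : String) : List (Int × String) :=
  (cpfAngleRules.filterMap (fun r => if PySem.Str.isIn r.2.1 angle then some (r.1, r.2.2) else none))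
  ++ (if angle == "politics explainer" then [((2 : Int), "What Happened?")] else [])
  ++ (cpfTitleWords.filterMap (fun w => if PySem.Str.isIn w title then some ((4 : Int), "What Happened?") else none))
  ++ (if PySem.Str.isIn "india" category then [((5 : Int), "Why It Matters")] else [])

def choose_post_format_alt (item : List (String × String)) : String :=
  let angle := PySem.Str.lower (PySem.Dict.getD (PySem.Dict.ofList item) "content_angle" "")
  let title := PySem.Str.lower (PySem.Dict.getD (PySem.Dict.ofList item) "title" "")
  let category := PySem.Str.lower (PySem.Dict.getD (PySem.Dict.ofList item) "category" "")
  -- min(hits, default=(6, "Explained Simply"))[1] : Python tuple min = min2?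
  ((PySem.List.min2? (cpfHits angle title category) (fun x => x.1) (fun x => x.2)).getD
    ((6 : Int), "Explained Simply")).2

-- ===== PRECONDITION & SPEC =====
def Spec_choose_post_format (item : List (String × String)) (out : String) : Prop := out = choose_post_format_alt item
instance (item : List (String × String)) (out : String) : Decidable (Spec_choose_post_format item out) := by unfold Spec_choose_post_format; infer_instance

-- ===== CLAIM (what is proved, stated in full; the proofs are below) =====
def Claim_equal_choose_post_format : Prop := ∀ (item : List (String × String)), Dom_choose_post_format item → Spec_choose_post_format item (choose_post_format item)

-- ===== LEMMAS AND PROOFS =====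

-- the fold step of Python's tuple min (= PySem.List.min2? on (Int, String) pairs)
def cpfStep (acc : Option (Int × String)) (x : Int × String) : Option (Int × String) :=
  match acc with
  | none => some x
  | some m =>
    if (decide (x.1 < m.1) || !decide (m.1 < x.1) && decide (x.2 < m.2)) = true
    then some x else some m

lemma cpf_min2_eq_foldl (l : List (Int × String)) :
    PySem.List.min2? l (fun x => x.1) (fun x => x.2) = List.foldl cpfStep none l := by
  unfold PySem.List.min2?
  congr 1
  funext acc x
  cases acc <;> rfl

-- The minimum of a list whose members all weakly exceed (p, lbl) — priority ≥ p, and label = lbl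
-- whenever the priority is exactly p — is (p, lbl) as soon as (p, lbl) occurs in the list.
lemma cpf_foldl_min_unique (p : Int) (lbl : String) :
    ∀ (l : List (Int × String)) (acc : Option (Int × String)),
      (acc = some (p, lbl) ∨ (p, lbl) ∈ l) →
      (∀ x, acc = some x → p ≤ x.1 ∧ (x.1 = p → x.2 = lbl)) →
      (∀ x ∈ l, p ≤ x.1 ∧ (x.1 = p → x.2 = lbl)) →
      List.foldl cpfStep acc l = some (p, lbl) := by
  intro l
  induction l with
  | nil =>
      intro acc hmem hacc _
      rcases hmem with h | h
      · simpa using h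
      · simp at h
  | cons y ys ih =>
      intro acc hmem hacc hbound
      simp only [List.foldl_cons]
      have hby := hbound y (List.mem_cons_self ..)
      have hbys : ∀ x ∈ ys, p ≤ x.1 ∧ (x.1 = p → x.2 = lbl) :=
        fun x hx => hbound x (List.mem_cons_of_mem _ hx)
      cases acc with
      | none =>
          have hstep : cpfStep none y = some y := rfl
          rw [hstep]
          refine ih (some y) ?_ ?_ hbys
          · rcases hmem with h | h
            · exact absurd h (by simp)
            · rcases List.mem_cons.mp h with h | h
              · exact Or.inl (by rw [h])
              · exact Or.inr h
          · intro x hx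
            injection hx with hx
            subst hx
            exact hby
      | some m =>
          have hm := hacc m rfl
          by_cases hc : (decide (y.1 < m.1) || !decide (m.1 < y.1) && decide (y.2 < m.2)) = true
          · have hstep : cpfStep (some m) y = some y := by
              simp only [cpfStep]
              rw [if_pos hc]
            rw [hstep]
            refine ih (some y) ?_ ?_ hbys
            · rcases hmem with h | h
              · -- the accumulator was already (p, lbl); the replacing element y must equal it
                injection h with h
                subst h
                simp only [Bool.or_eq_true, Bool.and_eq_true, Bool.not_eq_true',
                  decide_eq_true_eq, decide_eq_false_iff_not] at hc
                left
                rcases hc with h1 | ⟨h1, h2⟩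
                · exact absurd h1 (by omega)
                · have hfst : y.1 = p := by omega
                  exact congrArg some (Prod.ext hfst (hby.2 hfst))
              · rcases List.mem_cons.mp h with h | h
                · exact Or.inl (by rw [h])
                · exact Or.inr h
            · intro x hx
              injection hx with hx
              subst hx
              exact hby
          · have hstep : cpfStep (some m) y = some m := by
              simp only [cpfStep]
              rw [if_neg hc]
            rw [hstep]
            refine ih (some m) ?_ hacc hbys
            rcases hmem with h | h
            · exact Or.inl h
            · rcases List.mem_cons.mp h with h | h
              · -- y is (p, lbl) but did not replace the accumulator: then m = (p, lbl) already
                left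
                have hy : y = (p, lbl) := h.symm
                simp only [Bool.or_eq_true, Bool.and_eq_true, Bool.not_eq_true',
                  decide_eq_true_eq, decide_eq_false_iff_not, not_or] at hc
                have h1 : ¬ y.1 < m.1 := hc.1
                have hple := hm.1
                rw [hy] at h1
                simp only [not_lt] at h1
                have h1' : m.1 ≤ p := by simpa using h1
                have hfst : m.1 = p := by omega
                rw [show m = (p, lbl) from Prod.ext hfst (hm.2 hfst)]
              · exact Or.inr h

lemma cpf_min2_unique (p : Int) (lbl : String) (l : List (Int × String))
    (hmem : (p, lbl) ∈ l)
    (hbound : ∀ x ∈ l, p ≤ x.1 ∧ (x.1 = p → x.2 = lbl)) :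
    PySem.List.min2? l (fun x => x.1) (fun x => x.2) = some (p, lbl) := by
  rw [cpf_min2_eq_foldl]
  exact cpf_foldl_min_unique p lbl l none (Or.inr hmem) (by intro x hx; cases hx) hbound

lemma cpf_mem_ite_singleton {α : Type} (P : Prop) [Decidable P] (v x : α) :
    (x ∈ if P then [v] else ([] : List α)) ↔ (P ∧ x = v) := by
  split_ifs with h <;> simp [h]

lemma cpf_bound0 (ang ttl cat : String)  :
    ∀ x ∈ cpfHits ang ttl cat, (0 : Int) ≤ x.1 ∧ (x.1 = 0 → x.2 = "Exam Lens") := by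
  intro x hx
  simp only [cpfHits, cpfAngleRules, cpfTitleWords, List.mem_append, List.mem_filterMap,
    List.mem_cons, List.not_mem_nil, or_false, Option.ite_none_right_eq_some, Option.some.injEq,
    cpf_mem_ite_singleton, or_and_right, exists_or, exists_eq_left] at hx
  rcases hx with (((⟨h1,rfl⟩|⟨h1,rfl⟩|⟨h1,rfl⟩|⟨h1,rfl⟩|⟨h1,rfl⟩|⟨h1,rfl⟩|⟨h1,rfl⟩|⟨h1,rfl⟩)|⟨h1,rfl⟩)|(⟨h1,rfl⟩|⟨h1,rfl⟩|⟨h1,rfl⟩|⟨h1,rfl⟩|⟨h1,rfl⟩|⟨h1,rfl⟩))|⟨h1,rfl⟩ <;> simp_all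

lemma cpf_bound1 (ang ttl cat : String) (hb : PySem.Str.isIn "banking" ang = false) (he : PySem.Str.isIn "economy" ang = false) (hm : PySem.Str.isIn "markets" ang = false) (hr : PySem.Str.isIn "regulation" ang = false) :
    ∀ x ∈ cpfHits ang ttl cat, (1 : Int) ≤ x.1 ∧ (x.1 = 1 → x.2 = "Explained Simply") := by
  intro x hx
  simp only [cpfHits, cpfAngleRules, cpfTitleWords, List.mem_append, List.mem_filterMap,
    List.mem_cons, List.not_mem_nil, or_false, Option.ite_none_right_eq_some, Option.some.injEq,
    cpf_mem_ite_singleton, or_and_right, exists_or, exists_eq_left] at hx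
  rcases hx with (((⟨h1,rfl⟩|⟨h1,rfl⟩|⟨h1,rfl⟩|⟨h1,rfl⟩|⟨h1,rfl⟩|⟨h1,rfl⟩|⟨h1,rfl⟩|⟨h1,rfl⟩)|⟨h1,rfl⟩)|(⟨h1,rfl⟩|⟨h1,rfl⟩|⟨h1,rfl⟩|⟨h1,rfl⟩|⟨h1,rfl⟩|⟨h1,rfl⟩))|⟨h1,rfl⟩ <;> simp_all

lemma cpf_bound2 (ang ttl cat : String) (hb : PySem.Str.isIn "banking" ang = false) (he : PySem.Str.isIn "economy" ang = false) (hm : PySem.Str.isIn "markets" ang = false) (hr : PySem.Str.isIn "regulation" ang = false) (hg : PySem.Str.isIn "geopolitics" ang = false) :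
    ∀ x ∈ cpfHits ang ttl cat, (2 : Int) ≤ x.1 ∧ (x.1 = 2 → x.2 = "What Happened?") := by
  intro x hx
  simp only [cpfHits, cpfAngleRules, cpfTitleWords, List.mem_append, List.mem_filterMap,
    List.mem_cons, List.not_mem_nil, or_false, Option.ite_none_right_eq_some, Option.some.injEq,
    cpf_mem_ite_singleton, or_and_right, exists_or, exists_eq_left] at hx
  rcases hx with (((⟨h1,rfl⟩|⟨h1,rfl⟩|⟨h1,rfl⟩|⟨h1,rfl⟩|⟨h1,rfl⟩|⟨h1,rfl⟩|⟨h1,rfl⟩|⟨h1,rfl⟩)|⟨h1,rfl⟩)|(⟨h1,rfl⟩|⟨h1,rfl⟩|⟨h1,rfl⟩|⟨h1,rfl⟩|⟨h1,rfl⟩|⟨h1,rfl⟩))|⟨h1,rfl⟩ <;> simp_all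

lemma cpf_bound3 (ang ttl cat : String) (hb : PySem.Str.isIn "banking" ang = false) (he : PySem.Str.isIn "economy" ang = false) (hm : PySem.Str.isIn "markets" ang = false) (hr : PySem.Str.isIn "regulation" ang = false) (hg : PySem.Str.isIn "geopolitics" ang = false) (hpe : (ang == "politics explainer") = false) :
    ∀ x ∈ cpfHits ang ttl cat, (3 : Int) ≤ x.1 ∧ (x.1 = 3 → x.2 = "Why It Matters") := by
  intro x hx
  simp only [cpfHits, cpfAngleRules, cpfTitleWords, List.mem_append, List.mem_filterMap,
    List.mem_cons, List.not_mem_nil, or_false, Option.ite_none_right_eq_some, Option.some.injEq,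
    cpf_mem_ite_singleton, or_and_right, exists_or, exists_eq_left] at hx
  rcases hx with (((⟨h1,rfl⟩|⟨h1,rfl⟩|⟨h1,rfl⟩|⟨h1,rfl⟩|⟨h1,rfl⟩|⟨h1,rfl⟩|⟨h1,rfl⟩|⟨h1,rfl⟩)|⟨h1,rfl⟩)|(⟨h1,rfl⟩|⟨h1,rfl⟩|⟨h1,rfl⟩|⟨h1,rfl⟩|⟨h1,rfl⟩|⟨h1,rfl⟩))|⟨h1,rfl⟩ <;> simp_all

lemma cpf_bound4 (ang ttl cat : String) (hb : PySem.Str.isIn "banking" ang = false) (he : PySem.Str.isIn "economy" ang = false) (hm : PySem.Str.isIn "markets" ang = false) (hr : PySem.Str.isIn "regulation" ang = false) (hg : PySem.Str.isIn "geopolitics" ang = false) (hs : PySem.Str.isIn "science" ang = false) (hsp : PySem.Str.isIn "space" ang = false) (hh : PySem.Str.isIn "health" ang = false) (hpe : (ang == "politics explainer") = false) :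
    ∀ x ∈ cpfHits ang ttl cat, (4 : Int) ≤ x.1 ∧ (x.1 = 4 → x.2 = "What Happened?") := by
  intro x hx
  simp only [cpfHits, cpfAngleRules, cpfTitleWords, List.mem_append, List.mem_filterMap,
    List.mem_cons, List.not_mem_nil, or_false, Option.ite_none_right_eq_some, Option.some.injEq,
    cpf_mem_ite_singleton, or_and_right, exists_or, exists_eq_left] at hx
  rcases hx with (((⟨h1,rfl⟩|⟨h1,rfl⟩|⟨h1,rfl⟩|⟨h1,rfl⟩|⟨h1,rfl⟩|⟨h1,rfl⟩|⟨h1,rfl⟩|⟨h1,rfl⟩)|⟨h1,rfl⟩)|(⟨h1,rfl⟩|⟨h1,rfl⟩|⟨h1,rfl⟩|⟨h1,rfl⟩|⟨h1,rfl⟩|⟨h1,rfl⟩))|⟨h1,rfl⟩ <;> simp_all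

lemma cpf_bound5 (ang ttl cat : String) (hb : PySem.Str.isIn "banking" ang = false) (he : PySem.Str.isIn "economy" ang = false) (hm : PySem.Str.isIn "markets" ang = false) (hr : PySem.Str.isIn "regulation" ang = false) (hg : PySem.Str.isIn "geopolitics" ang = false) (hs : PySem.Str.isIn "science" ang = false) (hsp : PySem.Str.isIn "space" ang = false) (hh : PySem.Str.isIn "health" ang = false) (hk : PySem.Str.isIn "killed" ttl = false) (hinj : PySem.Str.isIn "injured" ttl = false) (hf : PySem.Str.isIn "fire" ttl = false) (hexp : PySem.Str.isIn "explosion" ttl = false) (hcr : PySem.Str.isIn "crash" ttl = false) (hat : PySem.Str.isIn "attack" ttl = false) (hpe : (ang == "politics explainer") = false) :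
    ∀ x ∈ cpfHits ang ttl cat, (5 : Int) ≤ x.1 ∧ (x.1 = 5 → x.2 = "Why It Matters") := by
  intro x hx
  simp only [cpfHits, cpfAngleRules, cpfTitleWords, List.mem_append, List.mem_filterMap,
    List.mem_cons, List.not_mem_nil, or_false, Option.ite_none_right_eq_some, Option.some.injEq,
    cpf_mem_ite_singleton, or_and_right, exists_or, exists_eq_left] at hx
  rcases hx with (((⟨h1,rfl⟩|⟨h1,rfl⟩|⟨h1,rfl⟩|⟨h1,rfl⟩|⟨h1,rfl⟩|⟨h1,rfl⟩|⟨h1,rfl⟩|⟨h1,rfl⟩)|⟨h1,rfl⟩)|(⟨h1,rfl⟩|⟨h1,rfl⟩|⟨h1,rfl⟩|⟨h1,rfl⟩|⟨h1,rfl⟩|⟨h1,rfl⟩))|⟨h1,rfl⟩ <;> simp_all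

lemma cpf_empty (ang ttl cat : String) (hb : PySem.Str.isIn "banking" ang = false) (he : PySem.Str.isIn "economy" ang = false) (hm : PySem.Str.isIn "markets" ang = false) (hr : PySem.Str.isIn "regulation" ang = false) (hg : PySem.Str.isIn "geopolitics" ang = false) (hs : PySem.Str.isIn "science" ang = false) (hsp : PySem.Str.isIn "space" ang = false) (hh : PySem.Str.isIn "health" ang = false) (hk : PySem.Str.isIn "killed" ttl = false) (hinj : PySem.Str.isIn "injured" ttl = false) (hf : PySem.Str.isIn "fire" ttl = false) (hexp : PySem.Str.isIn "explosion" ttl = false) (hcr : PySem.Str.isIn "crash" ttl = false) (hat : PySem.Str.isIn "attack" ttl = false) (hin : PySem.Str.isIn "india" cat = false) (hpe : (ang == "politics explainer") = false) :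
    cpfHits ang ttl cat = [] := by
  simp only [cpfHits, cpfAngleRules, cpfTitleWords, List.filterMap_cons, List.filterMap_nil, hb, he, hm, hr, hg, hs, hsp, hh,
    hk, hinj, hf, hexp, hcr, hat, hin, hpe]
  simp

lemma cpf_mem0 (ang ttl cat : String)
    (h : PySem.Str.isIn "banking" ang = true ∨ PySem.Str.isIn "economy" ang = true ∨
         PySem.Str.isIn "markets" ang = true ∨ PySem.Str.isIn "regulation" ang = true) :
    ((0 : Int), "Exam Lens") ∈ cpfHits ang ttl cat := by
  refine List.mem_append.mpr (Or.inl (List.mem_append.mpr (Or.inl (List.mem_append.mpr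
    (Or.inl (List.mem_filterMap.mpr ?_))))))
  rcases h with h | h | h | h
  · exact ⟨(0, "banking", "Exam Lens"), by simp [cpfAngleRules], by rw [if_pos h]⟩
  · exact ⟨(0, "economy", "Exam Lens"), by simp [cpfAngleRules], by rw [if_pos h]⟩
  · exact ⟨(0, "markets", "Exam Lens"), by simp [cpfAngleRules], by rw [if_pos h]⟩
  · exact ⟨(0, "regulation", "Exam Lens"), by simp [cpfAngleRules], by rw [if_pos h]⟩

lemma cpf_mem1 (ang ttl cat : String) (h : PySem.Str.isIn "geopolitics" ang = true) :
    ((1 : Int), "Explained Simply") ∈ cpfHits ang ttl cat := by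
  exact List.mem_append.mpr (Or.inl (List.mem_append.mpr (Or.inl (List.mem_append.mpr
    (Or.inl (List.mem_filterMap.mpr
      ⟨(1, "geopolitics", "Explained Simply"), by simp [cpfAngleRules], by rw [if_pos h]⟩))))))

lemma cpf_mem2 (ang ttl cat : String) (h : (ang == "politics explainer") = true) :
    ((2 : Int), "What Happened?") ∈ cpfHits ang ttl cat := by
  refine List.mem_append.mpr (Or.inl (List.mem_append.mpr (Or.inl (List.mem_append.mpr
    (Or.inr ?_)))))
  rw [if_pos h]
  simp

lemma cpf_mem3 (ang ttl cat : String)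
    (h : PySem.Str.isIn "science" ang = true ∨ PySem.Str.isIn "space" ang = true ∨
         PySem.Str.isIn "health" ang = true) :
    ((3 : Int), "Why It Matters") ∈ cpfHits ang ttl cat := by
  refine List.mem_append.mpr (Or.inl (List.mem_append.mpr (Or.inl (List.mem_append.mpr
    (Or.inl (List.mem_filterMap.mpr ?_))))))
  rcases h with h | h | h
  · exact ⟨(3, "science", "Why It Matters"), by simp [cpfAngleRules], by rw [if_pos h]⟩
  · exact ⟨(3, "space", "Why It Matters"), by simp [cpfAngleRules], by rw [if_pos h]⟩
  · exact ⟨(3, "health", "Why It Matters"), by simp [cpfAngleRules], by rw [if_pos h]⟩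

lemma cpf_mem4 (ang ttl cat : String)
    (h : (["killed","injured","fire","explosion","crash","attack"].any
          (fun w => PySem.Str.isIn w ttl)) = true) :
    ((4 : Int), "What Happened?") ∈ cpfHits ang ttl cat := by
  refine List.mem_append.mpr (Or.inl (List.mem_append.mpr (Or.inr
    (List.mem_filterMap.mpr ?_))))
  simp only [List.any_eq_true] at h
  obtain ⟨w, hw, hwt⟩ := h
  exact ⟨w, by simpa [cpfTitleWords] using hw, by rw [if_pos hwt]⟩

lemma cpf_mem5 (ang ttl cat : String) (h : PySem.Str.isIn "india" cat = true) :
    ((5 : Int), "Why It Matters") ∈ cpfHits ang ttl cat := by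
  refine List.mem_append.mpr (Or.inr ?_)
  rw [if_pos h]
  simp

-- A's decision chain equals B's min-over-hits selection, for arbitrary field values
lemma cpf_core (ttl ang cat : String) :
    (if PySem.Str.isIn "banking" ang || PySem.Str.isIn "economy" ang || PySem.Str.isIn "markets" ang || PySem.Str.isIn "regulation" ang then
      "Exam Lens"
    else if PySem.Str.isIn "geopolitics" ang then
      "Explained Simply"
    else if ang == "politics explainer" then
      "What Happened?"
    else if PySem.Str.isIn "science" ang || PySem.Str.isIn "space" ang || PySem.Str.isIn "health" ang then
      "Why It Matters"
    else if (["killed","injured","fire","explosion","crash","attack"].any (fun w => PySem.Str.isIn w ttl)) then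
      "What Happened?"
    else if PySem.Str.isIn "india" cat then
      "Why It Matters"
    else
      "Explained Simply")
    = ((PySem.List.min2? (cpfHits ang ttl cat) (fun x => x.1) (fun x => x.2)).getD
        ((6 : Int), "Explained Simply")).2 := by
  by_cases h0 : (PySem.Str.isIn "banking" ang || PySem.Str.isIn "economy" ang || PySem.Str.isIn "markets" ang || PySem.Str.isIn "regulation" ang) = true
  · rw [if_pos h0,
      cpf_min2_unique 0 "Exam Lens" _ (cpf_mem0 ang ttl cat (by simpa only [Bool.or_eq_true, or_assoc] using h0)) (cpf_bound0 ang ttl cat)]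
    rfl
  · rw [if_neg h0]
    rw [Bool.not_eq_true, Bool.or_eq_false_iff, Bool.or_eq_false_iff, Bool.or_eq_false_iff] at h0
    obtain ⟨⟨⟨hb, he⟩, hm⟩, hr⟩ := h0
    by_cases h1 : PySem.Str.isIn "geopolitics" ang = true
    · rw [if_pos h1,
        cpf_min2_unique 1 "Explained Simply" _ (cpf_mem1 ang ttl cat h1)
          (cpf_bound1 ang ttl cat hb he hm hr)]
      rfl
    · rw [if_neg h1]
      rw [Bool.not_eq_true] at h1
      by_cases h2 : (ang == "politics explainer") = true
      · rw [if_pos h2,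
          cpf_min2_unique 2 "What Happened?" _ (cpf_mem2 ang ttl cat h2)
            (cpf_bound2 ang ttl cat hb he hm hr h1)]
        rfl
      · rw [if_neg h2]
        rw [Bool.not_eq_true] at h2
        by_cases h3 : (PySem.Str.isIn "science" ang || PySem.Str.isIn "space" ang || PySem.Str.isIn "health" ang) = true
        · rw [if_pos h3,
            cpf_min2_unique 3 "Why It Matters" _ (cpf_mem3 ang ttl cat (by simpa only [Bool.or_eq_true, or_assoc] using h3))
              (cpf_bound3 ang ttl cat hb he hm hr h1 h2)]
          rfl
        · rw [if_neg h3]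
          rw [Bool.not_eq_true, Bool.or_eq_false_iff, Bool.or_eq_false_iff] at h3
          obtain ⟨⟨hs, hsp⟩, hh⟩ := h3
          by_cases h4 : (["killed","injured","fire","explosion","crash","attack"].any (fun w => PySem.Str.isIn w ttl)) = true
          · rw [if_pos h4,
              cpf_min2_unique 4 "What Happened?" _ (cpf_mem4 ang ttl cat h4)
                (cpf_bound4 ang ttl cat hb he hm hr h1 hs hsp hh h2)]
            rfl
          · rw [if_neg h4]
            rw [Bool.not_eq_true] at h4
            have h4' := List.any_eq_false.mp h4
            have hk : PySem.Str.isIn "killed" ttl = false := by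
              have := h4' "killed" (by simp); rwa [Bool.not_eq_true] at this
            have hinj : PySem.Str.isIn "injured" ttl = false := by
              have := h4' "injured" (by simp); rwa [Bool.not_eq_true] at this
            have hf : PySem.Str.isIn "fire" ttl = false := by
              have := h4' "fire" (by simp); rwa [Bool.not_eq_true] at this
            have hexp : PySem.Str.isIn "explosion" ttl = false := by
              have := h4' "explosion" (by simp); rwa [Bool.not_eq_true] at this
            have hcr : PySem.Str.isIn "crash" ttl = false := by
              have := h4' "crash" (by simp); rwa [Bool.not_eq_true] at this
            have hat : PySem.Str.isIn "attack" ttl = false := by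
              have := h4' "attack" (by simp); rwa [Bool.not_eq_true] at this
            by_cases h5 : PySem.Str.isIn "india" cat = true
            · rw [if_pos h5,
                cpf_min2_unique 5 "Why It Matters" _ (cpf_mem5 ang ttl cat h5)
                  (cpf_bound5 ang ttl cat hb he hm hr h1 hs hsp hh hk hinj hf hexp hcr hat h2)]
              rfl
            · rw [if_neg h5]
              rw [Bool.not_eq_true] at h5
              rw [cpf_empty ang ttl cat hb he hm hr h1 hs hsp hh hk hinj hf hexp hcr hat h5 h2]
              rfl

-- ===== VERDICT (by name: the statement is the Claim_ definition above) =====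
theorem choose_post_format_spec : Claim_equal_choose_post_format := by
  intro item _
  unfold Spec_choose_post_format choose_post_format choose_post_format_alt
  exact cpf_core _ _ _
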